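-- pv_equiv track=rewrite | github.com/hadronomy/dh-robotics | main.py | build_origin_labels
-- ===== SOURCE A (Python) =====
-- from typing import Dict, List, Optional, Tuple
--
-- def build_origin_labels(n: int, origin_flags: List[bool]) -> Dict[int, str]:
--     origin_labels = {}
--     origin_counter = 1
--
--     for i in range(n):
--         if origin_flags[i]:
--             origin_labels[i] = f"O{origin_counter}"
--             origin_counter += 1
--
--     return origin_labels
-- ===== SOURCE B (Python) =====
-- def build_origin_labels(n: int, origin_flags):
--     # Stage 1: prefix-sum table; prefix[i] = number of flagged positions strictly before i.
--     prefix = [0]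
--     for f in origin_flags:
--         prefix.append(prefix[-1] + (1 if f else 0))
--     # Stage 2: counter-free comprehension; each label is read off the prefix table.
--     return {i: f"O{prefix[i] + 1}" for i in range(n) if origin_flags[i]}
-- ===== Notes on version B (the rewrite author's own statement) =====
-- stated objective: alternative
-- what changed: Replaces the single filter-and-number loop threading a mutable counter by two staged passes: first a prefix-sum table of flag counts is built over origin_flags, then a counter-free dict comprehension labels each flagged index i independently as 1 + prefix[i].
import Mathlib
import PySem

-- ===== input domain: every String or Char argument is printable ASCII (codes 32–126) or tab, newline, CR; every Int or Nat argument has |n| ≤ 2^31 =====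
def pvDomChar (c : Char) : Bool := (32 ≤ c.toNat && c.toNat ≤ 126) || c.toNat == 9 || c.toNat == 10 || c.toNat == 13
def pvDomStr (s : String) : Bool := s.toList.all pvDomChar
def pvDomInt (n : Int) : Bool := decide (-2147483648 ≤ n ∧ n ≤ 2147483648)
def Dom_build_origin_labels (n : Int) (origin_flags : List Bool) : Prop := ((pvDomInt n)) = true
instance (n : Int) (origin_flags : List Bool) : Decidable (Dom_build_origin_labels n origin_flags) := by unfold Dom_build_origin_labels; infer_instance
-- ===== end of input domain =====

-- B removes A's running counter: each flagged index is labelled 1 + the count of flagged positions in its prefix (a counter-free dict comprehension); same values, no threaded state.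


-- ===== PORT A =====
-- for i in range(n): if origin_flags[i]: origin_labels[i] = f"O{origin_counter}"; origin_counter += 1
def build_origin_labels (n : Int) (origin_flags : List Bool) : List (Int × String) :=
  let st := (PySem.List.pyRange 0 n 1).foldl
    (fun (st : PySem.Dict Int String × Int) i =>
      if PySem.List.pyGetD origin_flags i false then
        (st.1.insert i ("O" ++ PySem.Int.toStr st.2), st.2 + 1)
      else st)
    (PySem.Dict.empty, 1)
  st.1.items

-- ===== PORT B =====
-- stage 1: prefix = [0]; for f in origin_flags: prefix.append(prefix[-1] + (1 if f else 0))
-- stage 2: {i: f"O{prefix[i] + 1}" for i in range(n) if origin_flags[i]};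
-- keys i from range(n) are distinct, so the dict's items are exactly the generated pairs in order.
def build_origin_labels_alt (n : Int) (origin_flags : List Bool) : List (Int × String) :=
  let pref := origin_flags.foldl
    (fun (acc : List Int) f => acc ++ [PySem.List.pyGetD acc (-1) 0 + (if f then 1 else 0)]) [0]
  ((PySem.List.pyRange 0 n 1).filter (fun i => PySem.List.pyGetD origin_flags i false)).map
    (fun i => (i, "O" ++ PySem.Int.toStr (PySem.List.pyGetD pref i 0 + 1)))

-- ===== PRECONDITION & SPEC =====
-- Python A raises IndexError when n exceeds len(origin_flags); exactly those inputs are excluded.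
def Pre_build_origin_labels (n : Int) (origin_flags : List Bool) : Prop :=
  n ≤ (origin_flags.length : Int)
instance (n : Int) (origin_flags : List Bool) : Decidable (Pre_build_origin_labels n origin_flags) := by unfold Pre_build_origin_labels; infer_instance
def pvWitness_build_origin_labels : Int × List Bool := (3, [true, false, true])

def Spec_build_origin_labels (n : Int) (origin_flags : List Bool) (out : List (Int × String)) : Prop := out = build_origin_labels_alt n origin_flags
instance (n : Int) (origin_flags : List Bool) (out : List (Int × String)) : Decidable (Spec_build_origin_labels n origin_flags out) := by unfold Spec_build_origin_labels; infer_instance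

-- ===== CLAIM =====
def Claim_equal_build_origin_labels : Prop := ∀ (n : Int) (origin_flags : List Bool), Dom_build_origin_labels n origin_flags → Pre_build_origin_labels n origin_flags → Spec_build_origin_labels n origin_flags (build_origin_labels n origin_flags)

-- ===== LEMMAS AND PROOFS =====

-- A's fold over any nodup list of keys fresh for d appends the filtered list numbered sequentially from c.
theorem pv_fold_items (origin_flags : List Bool) :
    ∀ (l : List Int) (d : PySem.Dict Int String) (c : Int),
      l.Nodup → (∀ i ∈ l, d.contains i = false) →
      (l.foldl (fun (st : PySem.Dict Int String × Int) i =>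
          if PySem.List.pyGetD origin_flags i false then
            (st.1.insert i ("O" ++ PySem.Int.toStr st.2), st.2 + 1)
          else st) (d, c)).1.items
        = d.items ++ (PySem.List.enumerate
            (l.filter (fun i => PySem.List.pyGetD origin_flags i false)) c).map
            (fun p => (p.2, "O" ++ PySem.Int.toStr p.1)) := by
  intro l
  induction l with
  | nil => intro d c _ _; simp [PySem.List.enumerate_nil]
  | cons i l ih =>
    intro d c hnd hfresh
    have hi : d.contains i = false := hfresh i (by simp)
    have hnd' : l.Nodup := hnd.of_cons
    by_cases hp : PySem.List.pyGetD origin_flags i false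
    · have hfresh' : ∀ j ∈ l, (d.insert i ("O" ++ PySem.Int.toStr c)).contains j = false := by
        intro j hj
        have hji : j ≠ i := by
          intro h; subst h; exact (List.nodup_cons.mp hnd).1 hj
        rw [PySem.Dict.contains_insert]
        simp [hji, hfresh j (List.mem_cons_of_mem _ hj)]
      simp only [List.foldl_cons, hp, if_true, List.filter_cons]
      rw [ih _ (c + 1) hnd' hfresh']
      rw [PySem.Dict.items_insert_of_not_contains (h := hi)]
      simp [PySem.List.enumerate_cons]
    · simp only [List.foldl_cons, hp, List.filter_cons]
      simp only [Bool.false_eq_true, if_false]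
      exact ih d c hnd' (fun j hj => hfresh j (List.mem_cons_of_mem _ hj))

-- the filtered range up to m has as many elements as there are true flags in the prefix of length m
theorem pv_len_filter (origin_flags : List Bool) :
    ∀ m : Nat, m ≤ origin_flags.length →
      (((PySem.List.pyRange 0 (m : Int) 1).filter
          (fun i => PySem.List.pyGetD origin_flags i false)).length : Int)
        = ((origin_flags.take m).countP (fun b => b) : Int) := by
  intro m
  induction m with
  | zero => intro _; simp [PySem.List.pyRange_one_eq_nil]
  | succ m ih =>
    intro hm
    have hm' : m ≤ origin_flags.length := Nat.le_of_succ_le hm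
    have hlt : m < origin_flags.length := hm
    have hrange : PySem.List.pyRange 0 ((m : Int) + 1) 1
        = PySem.List.pyRange 0 (m : Int) 1 ++ [(m : Int)] :=
      PySem.List.pyRange_one_succ_right (by positivity)
    have hget : PySem.List.pyGetD origin_flags (m : Int) false = origin_flags[m] := by
      rw [PySem.List.pyGetD_natCast]; simp [List.getD, hlt]
    have htake : origin_flags.take (m + 1) = origin_flags.take m ++ [origin_flags[m]] :=
      List.take_succ_eq_append_getElem hlt
    push_cast
    rw [hrange, List.filter_append, htake, List.countP_append]
    by_cases hb : origin_flags[m] = true <;>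
      simp [hget, hb, ih hm']

-- value accumulated by B's prefix loop after the first element: running counts of true flags
def pvCounts (flags : List Bool) (v : Int) : List Int :=
  match flags with
  | [] => []
  | f :: t => (v + (if f then 1 else 0)) :: pvCounts t (v + (if f then 1 else 0))

theorem pv_fold_prefix (flags : List Bool) :
    ∀ (acc : List Int) (x : Int),
      flags.foldl (fun (acc : List Int) f =>
          acc ++ [PySem.List.pyGetD acc (-1) 0 + (if f then 1 else 0)]) (acc ++ [x])
        = acc ++ [x] ++ pvCounts flags x := by
  induction flags with
  | nil => intro acc x; simp [pvCounts]
  | cons f t ih =>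
    intro acc x
    simp only [List.foldl_cons, PySem.List.pyGetD_neg_one_append_singleton, pvCounts]
    have := ih (acc ++ [x]) (x + (if f then 1 else 0))
    simp only [List.append_assoc] at this ⊢
    simpa using this

theorem pv_counts_get (flags : List Bool) :
    ∀ (v : Int) (m : Nat), m < flags.length →
      (pvCounts flags v)[m]? = some (v + (((flags.take (m + 1)).countP (fun b => b) : Nat) : Int)) := by
  induction flags with
  | nil => intro v m hm; simp at hm
  | cons f t ih =>
    intro v m hm
    cases m with
    | zero => cases f <;> simp [pvCounts]
    | succ k =>
      have hk : k < t.length := by simpa using hm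
      rw [show (pvCounts (f :: t) v)[k + 1]? = (pvCounts t (v + (if f then 1 else 0)))[k]? from by
        simp [pvCounts]]
      rw [ih _ k hk]
      cases f <;> simp <;> ring

-- prefix[m] = number of true flags among the first m entries
theorem pv_prefix_get (flags : List Bool) (m : Nat) (hm : m ≤ flags.length) :
    PySem.List.pyGetD (flags.foldl (fun (acc : List Int) f =>
        acc ++ [PySem.List.pyGetD acc (-1) 0 + (if f then 1 else 0)]) [0]) (m : Int) 0
      = (((flags.take m).countP (fun b => b) : Nat) : Int) := by
  have h0 : ([0] : List Int) = [] ++ [0] := rfl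
  rw [h0, pv_fold_prefix flags [] 0]
  rw [PySem.List.pyGetD_natCast]
  cases m with
  | zero => simp
  | succ k =>
    have hk : k < flags.length := hm
    simp [List.getD, pv_counts_get flags 0 k hk]

-- enumerate-numbered filtered range = prefix-table-labelled filtered range
theorem pv_enum_eq_count (origin_flags : List Bool) :
    ∀ m : Nat, m ≤ origin_flags.length →
      (PySem.List.enumerate
          ((PySem.List.pyRange 0 (m : Int) 1).filter
            (fun i => PySem.List.pyGetD origin_flags i false)) 1).map
          (fun p => (p.2, "O" ++ PySem.Int.toStr p.1))
        = ((PySem.List.pyRange 0 (m : Int) 1).filter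
            (fun i => PySem.List.pyGetD origin_flags i false)).map
            (fun i => (i, "O" ++ PySem.Int.toStr
                (PySem.List.pyGetD (origin_flags.foldl (fun (acc : List Int) f =>
                    acc ++ [PySem.List.pyGetD acc (-1) 0 + (if f then 1 else 0)]) [0]) i 0 + 1))) := by
  intro m
  induction m with
  | zero => intro _; simp [PySem.List.pyRange_one_eq_nil, PySem.List.enumerate_nil]
  | succ m ih =>
    intro hm
    have hm' : m ≤ origin_flags.length := Nat.le_of_succ_le hm
    have hrange : PySem.List.pyRange 0 ((m : Int) + 1) 1
        = PySem.List.pyRange 0 (m : Int) 1 ++ [(m : Int)] :=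
      PySem.List.pyRange_one_succ_right (by positivity)
    push_cast
    rw [hrange, List.filter_append]
    by_cases hp : PySem.List.pyGetD origin_flags (m : Int) false
    · have hfil : ([(m : Int)].filter (fun i => PySem.List.pyGetD origin_flags i false)) = [(m : Int)] := by
        simp [hp]
      rw [hfil, PySem.List.enumerate_append, List.map_append, List.map_append, ih hm']
      congr 1
      simp only [PySem.List.enumerate_cons, PySem.List.enumerate_nil, List.map_cons, List.map_nil]
      rw [pv_prefix_get origin_flags m hm']
      rw [pv_len_filter origin_flags m hm']
      simp [add_comm]
    · have : ([(m : Int)].filter (fun i => PySem.List.pyGetD origin_flags i false)) = [] := by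
        simp [hp]
      rw [this]
      simpa using ih hm'

-- ===== VERDICT =====
theorem build_origin_labels_spec : Claim_equal_build_origin_labels := by
  intro n origin_flags _ hpre
  unfold Pre_build_origin_labels at hpre
  unfold Spec_build_origin_labels build_origin_labels build_origin_labels_alt
  simp only []
  rw [pv_fold_items origin_flags (PySem.List.pyRange 0 n 1) PySem.Dict.empty 1
      (PySem.List.nodup_pyRange_one 0 n) (fun i _ => PySem.Dict.contains_empty i)]
  by_cases hn : n ≤ 0
  · simp [PySem.List.pyRange_one_eq_nil hn, PySem.List.enumerate_nil, PySem.Dict.empty]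
  · have h0 : 0 ≤ n := le_of_lt (lt_of_not_ge hn)
    have hn' : n = ((n.toNat : Nat) : Int) := (Int.toNat_of_nonneg h0).symm
    have hmle : n.toNat ≤ origin_flags.length := by omega
    rw [hn', pv_enum_eq_count origin_flags n.toNat hmle]
    simp [PySem.Dict.empty]
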